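-- pv_equiv track=rewrite | github.com/LeeClayberg/Advent-of-Code | 2021/Day19_a.py | rotation_from_int
-- ===== SOURCE A (Python) =====
-- def rotation_from_int(point_changes, h):
--     z_rotate = lambda pnt: (pnt[1], -pnt[0], pnt[2])
--     x_rotate = lambda pnt: (pnt[0], -pnt[2], pnt[1])
--     y_rotate = lambda pnt: (pnt[2], pnt[1], -pnt[0])
--     transformations = [
--         [],
--         [z_rotate],
--         [z_rotate, z_rotate],
--         [z_rotate, z_rotate, z_rotate],  # Front
--         [x_rotate],
--         [x_rotate, z_rotate],
--         [x_rotate, z_rotate, z_rotate],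
--         [x_rotate, z_rotate, z_rotate, z_rotate],  # Bottom
--         [x_rotate, x_rotate],
--         [x_rotate, x_rotate, z_rotate],
--         [x_rotate, x_rotate, z_rotate, z_rotate],
--         [x_rotate, x_rotate, z_rotate, z_rotate, z_rotate],  # Back
--         [x_rotate, x_rotate, x_rotate],
--         [x_rotate, x_rotate, x_rotate, z_rotate],
--         [x_rotate, x_rotate, x_rotate, z_rotate, z_rotate],
--         [x_rotate, x_rotate, x_rotate, z_rotate, z_rotate, z_rotate],  # Top
--         [y_rotate],
--         [y_rotate, z_rotate],
--         [y_rotate, z_rotate, z_rotate],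
--         [y_rotate, z_rotate, z_rotate, z_rotate],  # Left
--         [y_rotate, y_rotate, y_rotate],
--         [y_rotate, y_rotate, y_rotate, z_rotate],
--         [y_rotate, y_rotate, y_rotate, z_rotate, z_rotate],
--         [y_rotate, y_rotate, y_rotate, z_rotate, z_rotate, z_rotate]  # Right
--     ]
--     point_list = list(point_changes)
--     for rotation in transformations[h]:
--         point_list = list(map(rotation, point_list))
--     return set(point_list)
-- ===== SOURCE B (Python) =====
-- # One precomputed net rotation matrix per orientation, applied in a single pass.
-- _MATS = [
--     ((1, 0, 0), (0, 1, 0), (0, 0, 1)), ((0, 1, 0), (-1, 0, 0), (0, 0, 1)),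
--     ((-1, 0, 0), (0, -1, 0), (0, 0, 1)), ((0, -1, 0), (1, 0, 0), (0, 0, 1)),
--     ((1, 0, 0), (0, 0, -1), (0, 1, 0)), ((0, 0, -1), (-1, 0, 0), (0, 1, 0)),
--     ((-1, 0, 0), (0, 0, 1), (0, 1, 0)), ((0, 0, 1), (1, 0, 0), (0, 1, 0)),
--     ((1, 0, 0), (0, -1, 0), (0, 0, -1)), ((0, -1, 0), (-1, 0, 0), (0, 0, -1)),
--     ((-1, 0, 0), (0, 1, 0), (0, 0, -1)), ((0, 1, 0), (1, 0, 0), (0, 0, -1)),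
--     ((1, 0, 0), (0, 0, 1), (0, -1, 0)), ((0, 0, 1), (-1, 0, 0), (0, -1, 0)),
--     ((-1, 0, 0), (0, 0, -1), (0, -1, 0)), ((0, 0, -1), (1, 0, 0), (0, -1, 0)),
--     ((0, 0, 1), (0, 1, 0), (-1, 0, 0)), ((0, 1, 0), (0, 0, -1), (-1, 0, 0)),
--     ((0, 0, -1), (0, -1, 0), (-1, 0, 0)), ((0, -1, 0), (0, 0, 1), (-1, 0, 0)),
--     ((0, 0, -1), (0, 1, 0), (1, 0, 0)), ((0, 1, 0), (0, 0, 1), (1, 0, 0)),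
--     ((0, 0, 1), (0, -1, 0), (1, 0, 0)), ((0, -1, 0), (0, 0, -1), (1, 0, 0)),
-- ]
--
-- def rotation_from_int(point_changes, h):
--     (a, b, c), (d, e, f), (g, i, j) = _MATS[h]
--     return {(a*x + b*y + c*z, d*x + e*y + f*z, g*x + i*y + j*z)
--             for (x, y, z) in point_changes}
-- ===== Notes on version B (the rewrite author's own statement) =====
-- stated objective: simpler
-- what changed: Replaces up to six successive map passes drawn from a list of rotation-lambda sequences by a precomputed 24-entry table of net 3x3 integer rotation matrices applied to each point in one pass.
import Mathlib
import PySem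

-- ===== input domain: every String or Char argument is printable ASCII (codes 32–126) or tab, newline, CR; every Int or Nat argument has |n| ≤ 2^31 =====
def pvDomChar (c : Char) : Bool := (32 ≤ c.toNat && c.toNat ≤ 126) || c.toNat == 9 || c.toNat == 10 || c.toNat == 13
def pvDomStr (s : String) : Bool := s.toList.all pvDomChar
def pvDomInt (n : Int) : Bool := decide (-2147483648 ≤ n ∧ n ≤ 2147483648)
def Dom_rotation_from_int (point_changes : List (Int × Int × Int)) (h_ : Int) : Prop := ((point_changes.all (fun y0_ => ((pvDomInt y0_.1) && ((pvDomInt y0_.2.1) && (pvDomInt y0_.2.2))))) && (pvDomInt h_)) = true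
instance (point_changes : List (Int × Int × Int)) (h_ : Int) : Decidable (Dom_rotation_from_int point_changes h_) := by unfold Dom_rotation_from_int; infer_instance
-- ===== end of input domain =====

-- B replaces A's fold of up-to-six full-list rotation passes by one precomputed net
-- rotation matrix per orientation, applied to every point in a single pass (simpler).

-- ===== PORT A =====
def pvZRot (p : Int × Int × Int) : Int × Int × Int := (p.2.1, -p.1, p.2.2)
def pvXRot (p : Int × Int × Int) : Int × Int × Int := (p.1, -p.2.2, p.2.1)
def pvYRot (p : Int × Int × Int) : Int × Int × Int := (p.2.2, p.2.1, -p.1)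

def pvTransformations : List (List ((Int × Int × Int) → (Int × Int × Int))) :=
  [ [],
    [pvZRot],
    [pvZRot, pvZRot],
    [pvZRot, pvZRot, pvZRot],
    [pvXRot],
    [pvXRot, pvZRot],
    [pvXRot, pvZRot, pvZRot],
    [pvXRot, pvZRot, pvZRot, pvZRot],
    [pvXRot, pvXRot],
    [pvXRot, pvXRot, pvZRot],
    [pvXRot, pvXRot, pvZRot, pvZRot],
    [pvXRot, pvXRot, pvZRot, pvZRot, pvZRot],
    [pvXRot, pvXRot, pvXRot],
    [pvXRot, pvXRot, pvXRot, pvZRot],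
    [pvXRot, pvXRot, pvXRot, pvZRot, pvZRot],
    [pvXRot, pvXRot, pvXRot, pvZRot, pvZRot, pvZRot],
    [pvYRot],
    [pvYRot, pvZRot],
    [pvYRot, pvZRot, pvZRot],
    [pvYRot, pvZRot, pvZRot, pvZRot],
    [pvYRot, pvYRot, pvYRot],
    [pvYRot, pvYRot, pvYRot, pvZRot],
    [pvYRot, pvYRot, pvYRot, pvZRot, pvZRot],
    [pvYRot, pvYRot, pvYRot, pvZRot, pvZRot, pvZRot] ]

def rotation_from_int (point_changes : List (Int × Int × Int)) (h_ : Int) : List (Int × Int × Int) :=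
  match PySem.List.pyGet? pvTransformations h_ with
  | none => []  -- Python: IndexError (excluded by Pre_)
  | some rots => PySem.Set.ofList (rots.foldl (fun pts r => pts.map r) point_changes)

-- ===== PORT B =====
def pvMat := (Int × Int × Int) × (Int × Int × Int) × (Int × Int × Int)

def pvMats : List pvMat :=
  [ ((1, 0, 0), (0, 1, 0), (0, 0, 1)), ((0, 1, 0), (-1, 0, 0), (0, 0, 1)),
    ((-1, 0, 0), (0, -1, 0), (0, 0, 1)), ((0, -1, 0), (1, 0, 0), (0, 0, 1)),
    ((1, 0, 0), (0, 0, -1), (0, 1, 0)), ((0, 0, -1), (-1, 0, 0), (0, 1, 0)),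
    ((-1, 0, 0), (0, 0, 1), (0, 1, 0)), ((0, 0, 1), (1, 0, 0), (0, 1, 0)),
    ((1, 0, 0), (0, -1, 0), (0, 0, -1)), ((0, -1, 0), (-1, 0, 0), (0, 0, -1)),
    ((-1, 0, 0), (0, 1, 0), (0, 0, -1)), ((0, 1, 0), (1, 0, 0), (0, 0, -1)),
    ((1, 0, 0), (0, 0, 1), (0, -1, 0)), ((0, 0, 1), (-1, 0, 0), (0, -1, 0)),
    ((-1, 0, 0), (0, 0, -1), (0, -1, 0)), ((0, 0, -1), (1, 0, 0), (0, -1, 0)),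
    ((0, 0, 1), (0, 1, 0), (-1, 0, 0)), ((0, 1, 0), (0, 0, -1), (-1, 0, 0)),
    ((0, 0, -1), (0, -1, 0), (-1, 0, 0)), ((0, -1, 0), (0, 0, 1), (-1, 0, 0)),
    ((0, 0, -1), (0, 1, 0), (1, 0, 0)), ((0, 1, 0), (0, 0, 1), (1, 0, 0)),
    ((0, 0, 1), (0, -1, 0), (1, 0, 0)), ((0, -1, 0), (0, 0, -1), (1, 0, 0)) ]

def rotation_from_int_alt (point_changes : List (Int × Int × Int)) (h_ : Int) : List (Int × Int × Int) :=
  match PySem.List.pyGet? pvMats h_ with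
  | none => []  -- Python: IndexError (excluded by Pre_)
  | some m =>
      PySem.Set.ofList (point_changes.map (fun p =>
        (m.1.1 * p.1 + m.1.2.1 * p.2.1 + m.1.2.2 * p.2.2,
         m.2.1.1 * p.1 + m.2.1.2.1 * p.2.1 + m.2.1.2.2 * p.2.2,
         m.2.2.1 * p.1 + m.2.2.2.1 * p.2.1 + m.2.2.2.2 * p.2.2)))

-- ===== PRECONDITION & SPEC =====
-- Python raises IndexError when h is outside the list's index range -24..23; B raises there too.
def Pre_rotation_from_int (point_changes : List (Int × Int × Int)) (h_ : Int) : Prop :=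
  -24 ≤ h_ ∧ h_ < 24
instance (point_changes : List (Int × Int × Int)) (h_ : Int) : Decidable (Pre_rotation_from_int point_changes h_) := by unfold Pre_rotation_from_int; infer_instance

def pvWitness_rotation_from_int : (List (Int × Int × Int)) × Int := ([(1, 2, 3), (4, 5, 6)], 5)

def Spec_rotation_from_int (point_changes : List (Int × Int × Int)) (h_ : Int) (out : List (Int × Int × Int)) : Prop := out = rotation_from_int_alt point_changes h_
instance (point_changes : List (Int × Int × Int)) (h_ : Int) (out : List (Int × Int × Int)) : Decidable (Spec_rotation_from_int point_changes h_ out) := by unfold Spec_rotation_from_int; infer_instance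

-- ===== CLAIM (what is proved, stated in full; the proofs are below) =====
def Claim_equal_rotation_from_int : Prop := ∀ (point_changes : List (Int × Int × Int)) (h_ : Int), Dom_rotation_from_int point_changes h_ → Pre_rotation_from_int point_changes h_ → Spec_rotation_from_int point_changes h_ (rotation_from_int point_changes h_)

-- ===== LEMMAS AND PROOFS =====

-- ===== VERDICT (by name: the statement is the Claim_ definition above) =====
theorem rotation_from_int_spec : Claim_equal_rotation_from_int := by
  intro pcs h _ hpre
  obtain ⟨h1, h2⟩ := hpre
  unfold Spec_rotation_from_int rotation_from_int rotation_from_int_alt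
  interval_cases h <;>
  · simp [pvTransformations, pvMats, PySem.List.pyGet?, PySem.List.pyIdx?, Option.bind,
      List.getElem?_cons_zero, List.getElem?_cons_succ, List.foldl_cons, List.foldl_nil,
      List.map_map]
    first
      | · refine ((List.map_congr_left (g := id) ?_).trans (List.map_id pcs)).symm
          rintro ⟨a, b, c⟩ _
          refine Prod.ext ?_ (Prod.ext ?_ ?_) <;> simp
      | · refine congrArg PySem.Set.ofList (List.map_congr_left ?_)
          rintro ⟨a, b, c⟩ _
          refine Prod.ext ?_ (Prod.ext ?_ ?_) <;> simp [pvZRot, pvXRot, pvYRot] <;> ring_nf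
      | skip
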